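-- pv_equiv track=rewrite | github.com/Taikiy49/Geolabs | pythonApp/non-app-related/fill_missing_pages.py | parse_label_ranges
-- ===== SOURCE A (Python) =====
-- from typing import List, Set, Tuple
--
-- def parse_label_ranges(s: str) -> List[str]:
--     out: List[int] = []
--     seen = set()
--     parts = [p.strip() for p in s.split(",") if p.strip()]
--     for p in parts:
--         if "-" in p:
--             a,b = p.split("-",1)
--             try:
--                 a,b = int(a), int(b)
--                 for x in range(min(a,b), max(a,b)+1):
--                     if x not in seen:
--                         out.append(x); seen.add(x)
--             except ValueError:
--                 pass
--         else:
--             try: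
--                 x = int(p)
--                 if x not in seen:
--                     out.append(x); seen.add(x)
--             except ValueError:
--                 pass
--     return [str(x) for x in out]
-- ===== SOURCE B (Python) =====
-- def _part_ints(p):
--     if "-" in p:
--         a, b = p.split("-", 1)
--         try:
--             a, b = int(a), int(b)
--         except ValueError:
--             return []
--         return list(range(min(a, b), max(a, b) + 1))
--     try:
--         return [int(p)]
--     except ValueError:
--         return []
--
-- def parse_label_ranges(s):
--     # Build the result BACK-TO-FRONT: walk the parts right-to-left; each part's
--     # block of ints (duplicate-free by construction) is prepended, and any of its
--     # ints are subtracted from the already-built suffix. No global 'seen' set.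
--     parts = [p.strip() for p in s.split(",") if p.strip()]
--     acc = []
--     for p in reversed(parts):
--         ints = _part_ints(p)
--         block = set(ints)
--         acc = ints + [x for x in acc if x not in block]
--     return [str(x) for x in acc]
-- ===== Notes on version B (the rewrite author's own statement) =====
-- stated objective: alternative
-- what changed: B builds the answer back-to-front: it walks the parts right-to-left, prepending each part's (duplicate-free) block of ints and subtracting that block from the already-built suffix, so there is no global seen-set and no separate dedup pass; deduplication emerges from the subtraction.
import Mathlib
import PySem

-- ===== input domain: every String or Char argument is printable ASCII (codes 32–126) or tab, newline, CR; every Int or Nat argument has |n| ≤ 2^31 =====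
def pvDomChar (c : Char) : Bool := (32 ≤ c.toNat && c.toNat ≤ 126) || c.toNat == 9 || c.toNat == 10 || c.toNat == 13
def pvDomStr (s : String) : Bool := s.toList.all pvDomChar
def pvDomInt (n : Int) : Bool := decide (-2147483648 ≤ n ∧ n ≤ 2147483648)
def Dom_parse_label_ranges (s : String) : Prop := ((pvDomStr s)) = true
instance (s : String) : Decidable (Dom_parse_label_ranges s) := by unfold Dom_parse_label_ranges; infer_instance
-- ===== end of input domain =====

-- B builds the result back-to-front (right-to-left over the parts, subtracting each part's block
-- from the already-built suffix) instead of A's forward loop with a global seen-set; objective: alternative.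

-- ===== PORT A =====
-- A's inline dedup step: append x to out and add to seen unless already seen.
def pvA_step (st : List Int × PySem.Set Int) (x : Int) : List Int × PySem.Set Int :=
  if PySem.Set.contains st.2 x then st else (st.1 ++ [x], PySem.Set.add st.2 x)

-- one iteration of A's loop over a stripped nonempty part p
def pvA_part (st : List Int × PySem.Set Int) (p : String) : List Int × PySem.Set Int :=
  if PySem.Str.isIn "-" p then
    match PySem.Str.splitMax? p "-" 1 with
    | some [a, b] =>
      match PySem.Int.ofStr? a, PySem.Int.ofStr? b with
      | some a, some b => (PySem.List.pyRange (min a b) (max a b + 1) 1).foldl pvA_step st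
      | _, _ => st          -- ValueError: pass
    | _ => st               -- unreachable: split("-",1) with "-" in p gives two parts
  else
    match PySem.Int.ofStr? p with
    | some x => pvA_step st x
    | none => st            -- ValueError: pass

def parse_label_ranges (s : String) : List String :=
  let parts := (((PySem.Str.split? s ",").getD []).map PySem.Str.strip).filter (fun p => p ≠ "")
  let st := parts.foldl pvA_part ([], PySem.Set.empty)
  st.1.map PySem.Int.toStr

-- ===== PORT B =====
-- B's helper _part_ints: the ints a part yields (a range is duplicate-free by construction)
def pvB_partInts (p : String) : List Int :=
  if PySem.Str.isIn "-" p then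
    match PySem.Str.splitMax? p "-" 1 with
    | some [a, b] =>
      match PySem.Int.ofStr? a, PySem.Int.ofStr? b with
      | some a, some b => PySem.List.pyRange (min a b) (max a b + 1) 1
      | _, _ => []
    | _ => []
  else
    match PySem.Int.ofStr? p with
    | some x => [x]
    | none => []

-- one step of B's right-to-left loop: prepend this part's ints, subtract them from the suffix
def pvB_step (p : String) (acc : List Int) : List Int :=
  let ints := pvB_partInts p
  let block := PySem.Set.ofList ints
  ints ++ acc.filter (fun x => !(PySem.Set.contains block x))

def parse_label_ranges_alt (s : String) : List String :=
  let parts := (((PySem.Str.split? s ",").getD []).map PySem.Str.strip).filter (fun p => p ≠ "")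
  (parts.foldr pvB_step []).map PySem.Int.toStr

-- ===== PRECONDITION & SPEC =====
def Spec_parse_label_ranges (s : String) (out : List String) : Prop := out = parse_label_ranges_alt s
instance (s : String) (out : List String) : Decidable (Spec_parse_label_ranges s out) := by unfold Spec_parse_label_ranges; infer_instance

-- ===== CLAIM (what is proved, stated in full; the proofs are below) =====
def Claim_equal_parse_label_ranges : Prop := ∀ (s : String), Dom_parse_label_ranges s → Spec_parse_label_ranges s (parse_label_ranges s)

-- ===== LEMMAS AND PROOFS =====

-- A's step keeps out = seen in sync, and acts as Set.add on both components.
theorem pvA_step_diag (t : PySem.Set Int) (x : Int) :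
    pvA_step (t, t) x = (PySem.Set.add t x, PySem.Set.add t x) := by
  unfold pvA_step PySem.Set.add
  by_cases h : x ∈ t <;> simp [h, PySem.Set.contains]

theorem pvA_foldl_step_diag (l : List Int) (t : PySem.Set Int) :
    l.foldl pvA_step (t, t) = (PySem.Set.update t l, PySem.Set.update t l) := by
  induction l generalizing t with
  | nil => rfl
  | cons x xs ih =>
      simp only [List.foldl_cons, pvA_step_diag, ih, PySem.Set.update_cons]

-- each loop iteration of A equals folding A's step over the part's ints
theorem pvA_part_eq_partInts (st : List Int × PySem.Set Int) (p : String) :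
    pvA_part st p = (pvB_partInts p).foldl pvA_step st := by
  unfold pvA_part pvB_partInts
  by_cases h : PySem.Str.isIn "-" p
  · simp only [h, if_true]
    rcases hs : PySem.Str.splitMax? p "-" 1 with _ | ⟨l⟩
    · rfl
    · rcases l with _ | ⟨a, _ | ⟨b, _ | _⟩⟩
      · rfl
      · rfl
      · cases ha : PySem.Int.ofStr? a <;> cases hb : PySem.Int.ofStr? b <;>
          simp only [ha, hb, List.foldl_nil]
      · rfl
  · simp only [h]
    rcases PySem.Int.ofStr? p with _ | _ <;> rfl

theorem pvA_parts_fold (parts : List String) (t : PySem.Set Int) :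
    parts.foldl pvA_part (t, t)
      = (PySem.Set.update t (parts.flatMap pvB_partInts),
         PySem.Set.update t (parts.flatMap pvB_partInts)) := by
  induction parts generalizing t with
  | nil => rfl
  | cons p ps ih =>
      simp only [List.foldl_cons, pvA_part_eq_partInts, pvA_foldl_step_diag,
        List.flatMap_cons, PySem.Set.update_append, ih]

-- Set.update explained as append-then-subtract: the shape of B's step.
theorem pv_update_eq_append_filter (r t : List Int) :
    PySem.Set.update t r = t ++ (PySem.Set.ofList r).filter (fun x => !t.contains x) := by
  induction r generalizing t with
  | nil => simp [PySem.Set.update, PySem.Set.ofList, PySem.Set.empty]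
  | cons x xs ih =>
      have hadd : PySem.Set.update t (x :: xs) = PySem.Set.update (PySem.Set.add t x) xs :=
        PySem.Set.update_cons t x xs
      have hof : PySem.Set.ofList (x :: xs)
          = x :: (PySem.Set.ofList xs).filter (fun y => !([x] : List Int).contains y) := by
        have h1 : PySem.Set.ofList (x :: xs) = PySem.Set.update ([x] : List Int) xs := by
          simp [PySem.Set.ofList, PySem.Set.update, PySem.Set.add, PySem.Set.empty,
            PySem.Set.contains]
        rw [h1, ih]
        rfl
      rw [hadd, ih, hof]
      by_cases hx : x ∈ t
      · have hc : t.contains x = true := by simpa using hx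
        have haddt : PySem.Set.add t x = t := by simp [PySem.Set.add, hx]
        rw [haddt]
        simp only [List.filter_cons, hc, Bool.not_true, List.filter_filter]
        congr 1
        apply List.filter_congr
        intro y _
        by_cases hy : y ∈ t
        · simp [hy]
        · have hyx : y ≠ x := by rintro rfl; exact hy hx
          simp [hy, hyx]
      · have hc : t.contains x = false := by simpa using hx
        have haddt : PySem.Set.add t x = t ++ [x] := by
          simp [PySem.Set.add, hx]
        rw [haddt]
        simp only [List.filter_cons, hc, Bool.not_false, List.filter_filter, List.append_assoc,
          List.cons_append, List.nil_append]
        congr 2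
        apply List.filter_congr
        intro y _
        simp [Bool.and_comm]
  
theorem pv_update_nodup_fresh (l t : List Int) (hn : l.Nodup)
    (hf : ∀ x ∈ l, x ∉ t) : PySem.Set.update t l = t ++ l := by
  induction l generalizing t with
  | nil => simp [PySem.Set.update]
  | cons x xs ih =>
      have hx : x ∉ t := hf x List.mem_cons_self
      have hadd : PySem.Set.add t x = t ++ [x] := by
        simp [PySem.Set.add, hx]
      have hrest : ∀ y ∈ xs, y ∉ t ++ [x] := by
        intro y hy
        simp only [List.mem_append, List.mem_singleton]
        rintro (h | rfl)
        · exact hf y (List.mem_cons_of_mem _ hy) h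
        · exact (List.nodup_cons.mp hn).1 hy
      rw [PySem.Set.update_cons, hadd, ih (t ++ [x]) (List.nodup_cons.mp hn).2 hrest]
      simp
  
theorem pv_ofList_eq_self_of_nodup (l : List Int) (hn : l.Nodup) :
    PySem.Set.ofList l = l := by
  have := pv_update_nodup_fresh l [] hn (by intro x _ h; simp at h)
  simpa [PySem.Set.update, PySem.Set.ofList, PySem.Set.empty] using this

theorem pvB_partInts_nodup (p : String) : (pvB_partInts p).Nodup := by
  unfold pvB_partInts
  by_cases h : PySem.Str.isIn "-" p
  · simp only [h, if_true]
    rcases PySem.Str.splitMax? p "-" 1 with _ | ⟨_ | ⟨a, _ | ⟨b, _ | _⟩⟩⟩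
    · exact List.nodup_nil
    · exact List.nodup_nil
    · exact List.nodup_nil
    · dsimp only
      cases PySem.Int.ofStr? a <;> cases PySem.Int.ofStr? b <;>
        first
          | exact List.nodup_nil
          | exact PySem.List.nodup_pyRange_one _ _
    · exact List.nodup_nil
  · simp only [h]
    rcases PySem.Int.ofStr? p with _ | _
    · exact List.nodup_nil
    · exact List.nodup_singleton _

-- B's back-to-front fold computes exactly the first-occurrence set of all produced ints.
theorem pvB_foldr_eq_ofList (parts : List String) :
    parts.foldr pvB_step [] = PySem.Set.ofList (parts.flatMap pvB_partInts) := by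
  induction parts with
  | nil => rfl
  | cons p ps ih =>
      have hof : PySem.Set.ofList ((p :: ps).flatMap pvB_partInts)
          = PySem.Set.update (PySem.Set.ofList (pvB_partInts p)) (ps.flatMap pvB_partInts) := by
        simp only [List.flatMap_cons]
        have : PySem.Set.ofList (pvB_partInts p ++ ps.flatMap pvB_partInts)
            = PySem.Set.update (PySem.Set.update [] (pvB_partInts p)) (ps.flatMap pvB_partInts) := by
          rw [← PySem.Set.update_append]; rfl
        simpa [PySem.Set.update_nil_left] using this
      rw [List.foldr_cons, ih, hof,
        pv_ofList_eq_self_of_nodup _ (pvB_partInts_nodup p),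
        pv_update_eq_append_filter]
      simp only [pvB_step, pv_ofList_eq_self_of_nodup _ (pvB_partInts_nodup p)]
      simp [PySem.Set.contains]

-- ===== VERDICT (by name: the statement is the Claim_ definition above) =====
theorem parse_label_ranges_spec : Claim_equal_parse_label_ranges := by
  intro s _
  unfold Spec_parse_label_ranges
  simp only [parse_label_ranges, parse_label_ranges_alt]
  have h1 := pvA_parts_fold ((((PySem.Str.split? s ",").getD []).map PySem.Str.strip).filter (fun p => p ≠ "")) ([] : List Int)
  rw [show (PySem.Set.empty : PySem.Set Int) = ([] : List Int) from rfl, h1, pvB_foldr_eq_ofList]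
  rw [PySem.Set.update_nil_left]
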